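-- pv_equiv track=rewrite | github.com/Ammad-ud-din/paint_factory_puzzle | paintfactory/delivery_services/delivery_order.py | deliverOrder
-- ===== SOURCE A (Python) =====
-- def deliverOrder(paint, nPaintColors, customerId):
--
--     result = "Case #{}: ".format(customerId)
--     if not paint:
--         result += "IMPOSSIBLE"
--     else:
--         arr = [("1" if (i, 1) in paint else "0") for i in range(1, nPaintColors + 1)]
--         result += ' '.join(arr)
--
--     return result
-- ===== SOURCE B (Python) =====
-- def deliverOrder(paint, nPaintColors, customerId):
--     prefix = "Case #{}: ".format(customerId)
--     if not paint:
--         return prefix + "IMPOSSIBLE"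
--     arr = ["0"] * nPaintColors
--     for (c, shade) in paint:
--         if shade == 1 and 1 <= c <= nPaintColors:
--             arr[c - 1] = "1"
--     return prefix + ' '.join(arr)
-- ===== Notes on version B (the rewrite author's own statement) =====
-- stated objective: alternative
-- what changed: Instead of probing membership of (i,1) in the paint list once per color (a linear scan inside a comprehension over the color range), B allocates a '0' table of length nPaintColors once and scatters each paint entry with shade 1 and in-range color into its slot, then joins.
import Mathlib
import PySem

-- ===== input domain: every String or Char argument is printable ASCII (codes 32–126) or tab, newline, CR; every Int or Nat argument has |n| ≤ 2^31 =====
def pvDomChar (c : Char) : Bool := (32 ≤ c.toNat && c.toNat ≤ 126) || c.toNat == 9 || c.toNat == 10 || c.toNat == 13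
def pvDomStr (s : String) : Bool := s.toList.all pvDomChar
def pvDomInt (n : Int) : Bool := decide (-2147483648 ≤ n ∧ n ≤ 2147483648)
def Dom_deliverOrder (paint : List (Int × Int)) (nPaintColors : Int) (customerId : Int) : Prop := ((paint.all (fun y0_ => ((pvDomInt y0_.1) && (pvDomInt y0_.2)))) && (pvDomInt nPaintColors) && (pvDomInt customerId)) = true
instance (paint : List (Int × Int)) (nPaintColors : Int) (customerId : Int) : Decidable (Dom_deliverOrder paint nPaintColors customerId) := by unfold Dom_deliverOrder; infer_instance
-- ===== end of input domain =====

-- B replaces A's per-color membership scan of the paint list by a single scatter pass into a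
-- preallocated '0'/'1' table (alternative decomposition; asymptotically fewer list probes).

-- ===== PORT A =====
-- gather: for each color i in range(1, nPaintColors+1), probe (i, 1) in paint
def deliverOrder (paint : List (Int × Int)) (nPaintColors : Int) (customerId : Int) : String :=
  let result := "Case #" ++ PySem.Int.toStr customerId ++ ": "
  if paint = [] then
    result ++ "IMPOSSIBLE"
  else
    let arr := (PySem.List.pyRange 1 (nPaintColors + 1) 1).map
      (fun i => if (i, (1 : Int)) ∈ paint then "1" else "0")
    result ++ PySem.Str.join " " arr

-- ===== PORT B =====
-- one scatter step: arr[c-1] = "1" when shade == 1 and 1 <= c <= nPaintColors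
-- (the guard 1 ≤ p.1 makes the index p.1 - 1 nonnegative, so .toNat is exact here)
def scatterStep (nPaintColors : Int) (arr : List String) (p : Int × Int) : List String :=
  if p.2 = 1 ∧ 1 ≤ p.1 ∧ p.1 ≤ nPaintColors then arr.set (p.1 - 1).toNat "1" else arr

def deliverOrder_alt (paint : List (Int × Int)) (nPaintColors : Int) (customerId : Int) : String :=
  let pfx := "Case #" ++ PySem.Int.toStr customerId ++ ": "
  if paint = [] then
    pfx ++ "IMPOSSIBLE"
  else
    -- ["0"] * nPaintColors  (empty when nPaintColors ≤ 0, as in Python)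
    let arr := paint.foldl (scatterStep nPaintColors) (List.replicate nPaintColors.toNat "0")
    pfx ++ PySem.Str.join " " arr

-- ===== PRECONDITION & SPEC =====
def Spec_deliverOrder (paint : List (Int × Int)) (nPaintColors : Int) (customerId : Int) (out : String) : Prop := out = deliverOrder_alt paint nPaintColors customerId
instance (paint : List (Int × Int)) (nPaintColors : Int) (customerId : Int) (out : String) : Decidable (Spec_deliverOrder paint nPaintColors customerId out) := by unfold Spec_deliverOrder; infer_instance

-- ===== CLAIM (what is proved, stated in full; the proofs are below) =====
def Claim_equal_deliverOrder : Prop := ∀ (paint : List (Int × Int)) (nPaintColors : Int) (customerId : Int), Dom_deliverOrder paint nPaintColors customerId → Spec_deliverOrder paint nPaintColors customerId (deliverOrder paint nPaintColors customerId)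

-- ===== LEMMAS AND PROOFS =====

theorem scatter_length (n : Int) (paint : List (Int × Int)) (arr0 : List String) :
    (paint.foldl (scatterStep n) arr0).length = arr0.length := by
  induction paint generalizing arr0 with
  | nil => rfl
  | cons p t ih =>
      simp only [List.foldl_cons]
      rw [ih]
      unfold scatterStep
      split <;> simp

-- the scatter fold's cell j holds "1" iff (j+1, 1) occurs in paint, else the initial cell
theorem scatter_getD (n : Int) (paint : List (Int × Int)) (arr0 : List String)
    (h : arr0.length = n.toNat) (j : Nat) (hj : j < n.toNat) :
    (paint.foldl (scatterStep n) arr0).getD j "" =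
      if ((j : Int) + 1, (1 : Int)) ∈ paint then "1" else arr0.getD j "" := by
  induction paint generalizing arr0 with
  | nil => simp
  | cons p t ih =>
      simp only [List.foldl_cons]
      by_cases hg : p.2 = 1 ∧ 1 ≤ p.1 ∧ p.1 ≤ n
      · have hstep : scatterStep n arr0 p = arr0.set (p.1 - 1).toNat "1" := by
          unfold scatterStep; simp [hg]
        rw [hstep, ih _ (by simpa using h)]
        by_cases ht : ((j : Int) + 1, (1 : Int)) ∈ t
        · simp [ht, List.mem_cons]
        · by_cases hp : p = ((j : Int) + 1, (1 : Int))
          · have hidx : (p.1 - 1).toNat = j := by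
              rw [hp]; simp
            have hjlen : j < arr0.length := by omega
            rw [hidx, List.getD_eq_getElem?_getD, List.getD_eq_getElem?_getD,
              List.getElem?_set_self hjlen]
            simp [List.mem_cons, hp, ht]
          · have hc : p.1 ≠ (j : Int) + 1 := by
              intro hcontra
              apply hp
              obtain ⟨p1, p2⟩ := p
              simp only [Prod.mk.injEq]
              exact ⟨hcontra, hg.1⟩
            have hne : (p.1 - 1).toNat ≠ j := by
              have h1 : 1 ≤ p.1 := hg.2.1
              omega
            rw [List.getD_eq_getElem?_getD, List.getD_eq_getElem?_getD,
              List.getElem?_set_ne hne]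
            simp [List.mem_cons, ht, Ne.symm hp]
      · have hstep : scatterStep n arr0 p = arr0 := by
          unfold scatterStep; simp [hg]
        rw [hstep, ih _ h]
        have hp : p ≠ ((j : Int) + 1, (1 : Int)) := by
          intro hcontra
          apply hg
          rw [hcontra]
          refine ⟨rfl, by omega, by omega⟩
        simp [List.mem_cons, Ne.symm hp]

theorem arrays_eq (paint : List (Int × Int)) (n : Int) :
    (PySem.List.pyRange 1 (n + 1) 1).map
        (fun i => if (i, (1 : Int)) ∈ paint then "1" else "0") =
      paint.foldl (scatterStep n) (List.replicate n.toNat "0") := by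
  have hlen0 : (List.replicate n.toNat "0").length = n.toNat := by simp
  have hlenB := scatter_length n paint (List.replicate n.toNat "0")
  apply List.ext_getElem
  · simp [PySem.List.length_pyRange_one, hlenB]
  · intro j h1 h2
    have hj : j < n.toNat := by
      have := PySem.List.length_pyRange_one (a := 1) (b := n + 1)
      simp [List.length_map, this] at h1
      omega
    have hB := scatter_getD n paint (List.replicate n.toNat "0") hlen0 j hj
    have hBj : (paint.foldl (scatterStep n) (List.replicate n.toNat "0")).getD j "" =
        (paint.foldl (scatterStep n) (List.replicate n.toNat "0"))[j] := by
      rw [List.getD_eq_getElem]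
    rw [← hBj, hB]
    have hA : ((PySem.List.pyRange 1 (n + 1) 1).map
        (fun i => if (i, (1 : Int)) ∈ paint then "1" else "0"))[j] =
        (fun i => if (i, (1 : Int)) ∈ paint then "1" else "0")
          ((PySem.List.pyRange 1 (n + 1) 1)[j]'(by simpa using h1)) := by
      simp
    rw [hA, PySem.List.getElem_pyRange_one]
    have hcomm : (1 : Int) + (j : Int) = (j : Int) + 1 := by ring
    rw [hcomm]
    by_cases hm : ((j : Int) + 1, (1 : Int)) ∈ paint
    · simp [hm]
    · simp [hm, hj]

-- ===== VERDICT (by name: the statement is the Claim_ definition above) =====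
theorem deliverOrder_spec : Claim_equal_deliverOrder := by
  intro paint n cid _
  by_cases hp : paint = []
  · simp [Spec_deliverOrder, deliverOrder, deliverOrder_alt, hp]
  · simp only [Spec_deliverOrder, deliverOrder, deliverOrder_alt, if_neg hp]
    rw [arrays_eq]
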